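-- pv_equiv track=rewrite | github.com/appleeatsapples-lang/SIRR | Engine/modules/transliterate.py | _transliterate_word_hebrew
-- ===== SOURCE A (Python) =====
-- _HE_DIGRAPHS: list[tuple[str, str]] = [
--     ("SH", "\u05e9"),   # ש
--     ("CH", "\u05d7"),   # ח
--     ("TH", "\u05ea"),   # ת
--     ("TS", "\u05e6"),   # צ
--     ("TZ", "\u05e6"),   # צ
-- ]
--
-- _HE_SINGLES: dict[str, str] = {
--     "A": "\u05d0",   # א
--     "B": "\u05d1",   # ב
--     "G": "\u05d2",   # ג
--     "D": "\u05d3",   # ד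
--     "H": "\u05d4",   # ה
--     "V": "\u05d5",   # ו
--     "W": "\u05d5",   # ו
--     "Z": "\u05d6",   # ז
--     "T": "\u05d8",   # ט
--     "Y": "\u05d9",   # י
--     "K": "\u05db",   # כ
--     "L": "\u05dc",   # ל
--     "M": "\u05de",   # מ
--     "N": "\u05e0",   # נ
--     "S": "\u05e1",   # ס
--     "P": "\u05e4",   # פ
--     "F": "\u05e4",   # פ
--     "Q": "\u05e7",   # ק
--     "R": "\u05e8",   # ר
--     # Vowels (Hebrew uses matres lectionis sparingly)
--     "I": "\u05d9",   # י
--     "E": "\u05d9",   # י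
--     "O": "\u05d5",   # ו
--     "U": "\u05d5",   # ו
--     # No-equivalent letters
--     "C": "\u05db",   # כ (hard C)
--     "J": "\u05d2",   # ג (approximation)
--     "X": "\u05db\u05e1",  # כס (KS)
-- }
--
-- def _transliterate_word_hebrew(word: str) -> str:
--     """Transliterate a single word to Hebrew script."""
--     upper = word.upper().strip()
--     if not upper:
--         return ""
--
--     result = []
--     i = 0
--     while i < len(upper):
--         matched = False
--         if i + 1 < len(upper):
--             pair = upper[i:i+2]
--             for digraph, he_char in _HE_DIGRAPHS:
--                 if pair == digraph:
--                     result.append(he_char)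
--                     i += 2
--                     matched = True
--                     break
--         if matched:
--             continue
--
--         ch = upper[i]
--         if ch in _HE_SINGLES:
--             result.append(_HE_SINGLES[ch])
--         i += 1
--
--     return "".join(result)
-- ===== SOURCE B (Python) =====
-- _HE_DIGRAPHS: list[tuple[str, str]] = [
--     ("SH", "\u05e9"), ("CH", "\u05d7"), ("TH", "\u05ea"),
--     ("TS", "\u05e6"), ("TZ", "\u05e6"),
-- ]
--
-- _HE_SINGLES: dict[str, str] = {
--     "A": "\u05d0", "B": "\u05d1", "G": "\u05d2", "D": "\u05d3",
--     "H": "\u05d4", "V": "\u05d5", "W": "\u05d5", "Z": "\u05d6",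
--     "T": "\u05d8", "Y": "\u05d9", "K": "\u05db", "L": "\u05dc",
--     "M": "\u05de", "N": "\u05e0", "S": "\u05e1", "P": "\u05e4",
--     "F": "\u05e4", "Q": "\u05e7", "R": "\u05e8",
--     "I": "\u05d9", "E": "\u05d9", "O": "\u05d5", "U": "\u05d5",
--     "C": "\u05db", "J": "\u05d2", "X": "\u05db\u05e1",
-- }
--
-- _HE_DIG = dict(_HE_DIGRAPHS)
--
-- def _transliterate_word_hebrew(word: str) -> str:
--     """Transliterate a single word to Hebrew script.
--
--     Streaming automaton: scan the characters once, holding at most one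
--     pending character; a pending char + the current char that form a
--     digraph are emitted together, otherwise the pending char is emitted
--     alone and the current char becomes pending.  At any position at most
--     one digraph can start (keys are distinct), so this leftmost maximal
--     munch equals the original's indexed lookahead scan.
--     """
--     upper = word.upper().strip()
--     if not upper:
--         return ""
--     out = []
--     held = ""
--     for ch in upper:
--         if held:
--             he = _HE_DIG.get(held + ch)
--             if he is not None:
--                 out.append(he)
--                 held = ""
--                 continue
--             out.append(_HE_SINGLES.get(held, ""))
--         held = ch
--     if held:
--         out.append(_HE_SINGLES.get(held, ""))
--     return "".join(out)
-- ===== Notes on version B (the rewrite author's own statement) =====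
-- stated objective: alternative
-- what changed: Replaces the index-advancing while-loop with its 2-char slicing and inner linear scan over the digraph list by a single streaming for-loop over the characters that keeps one pending character as state, emitting a digraph from a dict when pending+current matches and otherwise flushing the pending single; a final flush handles the last character.
import Mathlib
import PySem

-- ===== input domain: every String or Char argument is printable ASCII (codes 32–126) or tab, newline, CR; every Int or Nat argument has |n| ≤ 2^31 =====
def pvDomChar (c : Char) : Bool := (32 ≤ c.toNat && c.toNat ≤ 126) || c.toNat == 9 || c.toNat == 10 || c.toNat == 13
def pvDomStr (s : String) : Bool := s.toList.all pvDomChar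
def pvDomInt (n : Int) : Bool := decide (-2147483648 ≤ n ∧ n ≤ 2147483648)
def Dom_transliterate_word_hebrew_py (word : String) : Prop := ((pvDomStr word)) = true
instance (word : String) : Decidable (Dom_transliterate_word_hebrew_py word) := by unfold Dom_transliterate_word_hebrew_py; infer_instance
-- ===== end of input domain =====

-- B replaces A's index-advancing while-loop (2-char slice + inner scan over the digraph list)
-- by a single streaming fold with a pending-character state; objective: alternative (return value only).

-- ===== PORT A =====
-- _HE_DIGRAPHS (keys and values as code-point lists, per the string convention)
def pvHeDigraphs : List (List Char × List Char) :=
  [(['S','H'], ['ש']), (['C','H'], ['ח']), (['T','H'], ['ת']), (['T','S'], ['צ']), (['T','Z'], ['צ'])]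

-- _HE_SINGLES
def pvHeSingles : PySem.Dict (List Char) (List Char) := PySem.Dict.ofList
  [ (['A'], ['א']), (['B'], ['ב']), (['G'], ['ג']), (['D'], ['ד']),
    (['H'], ['ה']), (['V'], ['ו']), (['W'], ['ו']), (['Z'], ['ז']),
    (['T'], ['ט']), (['Y'], ['י']), (['K'], ['כ']), (['L'], ['ל']),
    (['M'], ['מ']), (['N'], ['נ']), (['S'], ['ס']), (['P'], ['פ']),
    (['F'], ['פ']), (['Q'], ['ק']), (['R'], ['ר']),
    (['I'], ['י']), (['E'], ['י']), (['O'], ['ו']), (['U'], ['ו']),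
    (['C'], ['כ']), (['J'], ['ג']), (['X'], ['כ','ס']) ]

-- the inner 'for digraph, he_char in _HE_DIGRAPHS: if pair == digraph: … break'
def pvFindDigraph (pair : List Char) : List (List Char × List Char) → Option (List Char)
  | [] => none
  | (digraph, he_char) :: rest =>
    if pair == digraph then some he_char else pvFindDigraph pair rest

-- the 'while i < len(upper)' loop; 'result' carries the appended pieces
def pvALoop (upper : List Char) (i : Nat) (result : List (List Char)) : List (List Char) :=
  if h : i < upper.length then
    let step :=
      if i + 1 < upper.length then
        pvFindDigraph (PySem.Chars.slice upper (some (i : Int)) (some ((i : Int) + 2))) pvHeDigraphs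
      else none
    match step with
    | some he_char => pvALoop upper (i + 2) (result ++ [he_char])
    | none =>
      let ch := upper[i]
      match pvHeSingles.get? [ch] with
      | some v => pvALoop upper (i + 1) (result ++ [v])
      | none => pvALoop upper (i + 1) result
  else result
termination_by upper.length - i

def transliterate_word_hebrew_py (word : String) : String :=
  let upper := PySem.Chars.strip (PySem.Chars.upper word.toList)
  if upper = [] then ""
  else String.ofList (PySem.Chars.join [] (pvALoop upper 0 []))

-- ===== PORT B =====
-- _HE_DIG = dict(_HE_DIGRAPHS)
def pvHeDig : PySem.Dict (List Char) (List Char) := PySem.Dict.ofList pvHeDigraphs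

-- the loop body: state = (out, held); held = none models Python's held == ""
def pvBStep (st : List (List Char) × Option Char) (ch : Char) : List (List Char) × Option Char :=
  match st with
  | (out, some h) =>
    match pvHeDig.get? [h, ch] with
    | some he => (out ++ [he], none)           -- digraph: emit, clear held
    | none => (out ++ [pvHeSingles.getD [h] []], some ch)  -- flush held single, hold ch
  | (out, none) => (out, some ch)

-- the final 'if held: out.append(_HE_SINGLES.get(held, ""))'
def pvBFlush (st : List (List Char) × Option Char) : List (List Char) :=
  match st with
  | (out, some h) => out ++ [pvHeSingles.getD [h] []]
  | (out, none) => out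

def transliterate_word_hebrew_py_alt (word : String) : String :=
  let upper := PySem.Chars.strip (PySem.Chars.upper word.toList)
  if upper = [] then ""
  else String.ofList (PySem.Chars.join [] (pvBFlush (upper.foldl pvBStep ([], none))))

-- ===== PRECONDITION & SPEC =====
def Spec_transliterate_word_hebrew_py (word : String) (out : String) : Prop := out = transliterate_word_hebrew_py_alt word
instance (word : String) (out : String) : Decidable (Spec_transliterate_word_hebrew_py word out) := by unfold Spec_transliterate_word_hebrew_py; infer_instance

-- ===== CLAIM (what is proved, stated in full; the proofs are below) =====
def Claim_equal_transliterate_word_hebrew_py : Prop := ∀ (word : String), Dom_transliterate_word_hebrew_py word → Spec_transliterate_word_hebrew_py word (transliterate_word_hebrew_py word)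

-- ===== LEMMAS AND PROOFS =====

theorem pvJoin_nil (xs : List (List Char)) : PySem.Chars.join [] xs = xs.flatten := by
  induction xs with
  | nil => simp [pysem]
  | cons a t ih =>
    cases t with
    | nil => simp [pysem]
    | cons b t2 => rw [PySem.Chars.join_cons_cons]; simp [ih]

theorem pvFindDigraph_eq (p : List Char) : pvFindDigraph p pvHeDigraphs = pvHeDig.get? p := by
  have h : pvHeDig = PySem.Dict.mk pvHeDigraphs := by decide
  rw [h]
  simp only [pvFindDigraph, pvHeDigraphs, PySem.Dict.get?_mk_cons, beq_iff_eq]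
  simp [PySem.Dict.get?, eq_comm]

-- the accumulator of the fold is prefix-additive
theorem pvFold_shift (l : List Char) (out acc : List (List Char)) (held : Option Char) :
    l.foldl pvBStep (out ++ acc, held)
      = (out ++ (l.foldl pvBStep (acc, held)).1, (l.foldl pvBStep (acc, held)).2) := by
  induction l generalizing acc held with
  | nil => simp
  | cons c rest ih =>
    cases held with
    | none => simp only [List.foldl_cons, pvBStep]; exact ih acc (some c)
    | some h =>
      simp only [List.foldl_cons, pvBStep]
      rcases hd : pvHeDig.get? [h, c] with _ | he
      · simp only []
        rw [List.append_assoc]; exact ih (acc ++ [pvHeSingles.getD [h] []]) (some c)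
      · simp only []
        rw [List.append_assoc]; exact ih (acc ++ [he]) none

theorem pvFold_shift' (l : List Char) (out : List (List Char)) (held : Option Char) :
    l.foldl pvBStep (out, held)
      = (out ++ (l.foldl pvBStep ([], held)).1, (l.foldl pvBStep ([], held)).2) := by
  have := pvFold_shift l out [] held
  simpa using this

-- B's result on a suffix, as a function of the suffix (held = none at entry)
def pvBRun (l : List Char) : List (List Char) := pvBFlush (l.foldl pvBStep ([], none))

theorem pvBRun_nil : pvBRun [] = [] := rfl

theorem pvBRun_single (a : Char) : pvBRun [a] = [pvHeSingles.getD [a] []] := rfl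

theorem pvBRun_cons_cons (a b : Char) (rest : List Char) :
    pvBRun (a :: b :: rest)
      = match pvHeDig.get? [a, b] with
        | some he => he :: pvBRun rest
        | none => pvHeSingles.getD [a] [] :: pvBRun (b :: rest) := by
  simp only [pvBRun, List.foldl_cons, pvBStep]
  rcases hd : pvHeDig.get? [a, b] with _ | he
  · simp only [List.nil_append]
    rw [pvFold_shift' rest [pvHeSingles.getD [a] []] (some b)]
    have hb : (b :: rest).foldl pvBStep ([], none) = rest.foldl pvBStep ([], some b) := by
      simp [pvBStep]
    rcases hfold : rest.foldl pvBStep ([], (some b)) with ⟨o, hld⟩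
    cases hld <;> simp [pvBFlush]
  · simp only [List.nil_append]
    rw [pvFold_shift' rest [he] none]
    rcases hfold : rest.foldl pvBStep ([], none) with ⟨o, hld⟩
    cases hld <;> simp [pvBFlush]

theorem pvSinglesFlat_none (c : Char) (h : pvHeSingles.get? [c] = none) :
    pvHeSingles.getD [c] [] = [] := by
  simp [PySem.Dict.getD, h]

theorem pvSinglesFlat_some (c : Char) (v : List Char) (h : pvHeSingles.get? [c] = some v) :
    pvHeSingles.getD [c] [] = v := by
  simp [PySem.Dict.getD, h]

theorem pvLoop_eq (upper : List Char) (i : Nat) (res : List (List Char)) :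
    (pvALoop upper i res).flatten
      = res.flatten ++ (pvBRun (upper.drop i)).flatten := by
  rw [pvALoop]
  by_cases h : i < upper.length
  · rw [dif_pos h]
    have hdropi : upper.drop i = upper[i] :: upper.drop (i + 1) := List.drop_eq_getElem_cons h
    by_cases h2 : i + 1 < upper.length
    · have hdrop1 : upper.drop (i + 1) = upper[i+1] :: upper.drop (i + 2) :=
        List.drop_eq_getElem_cons h2
      have hslice : PySem.Chars.slice upper (some (i : Int)) (some ((i : Int) + 2))
          = [upper[i], upper[i+1]] := by
        have hcast : ((i : Int) + 2) = ((i + 2 : Nat) : Int) := by push_cast; ring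
        have h22 : (i + 2) - i = 2 := by omega
        rw [hcast]
        simp only [PySem.Chars.slice_eq_listSlice, PySem.List.slice_natCast, h22, hdropi, hdrop1]
        rfl
      rw [hdropi, hdrop1, pvBRun_cons_cons]
      rcases hdig : pvHeDig.get? [upper[i], upper[i+1]] with _ | v
      · -- no digraph at i: single char
        rcases hs : pvHeSingles.get? [upper[i]] with _ | v
        · simp only [if_pos h2, hslice, pvFindDigraph_eq, hdig, hs]
          rw [pvLoop_eq upper (i+1) res, hdrop1]
          simp [pvSinglesFlat_none _ hs]
        · simp only [if_pos h2, hslice, pvFindDigraph_eq, hdig, hs]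
          rw [pvLoop_eq upper (i+1) (res ++ [v]), hdrop1]
          simp [pvSinglesFlat_some _ _ hs]
      · simp only [if_pos h2, hslice, pvFindDigraph_eq, hdig]
        rw [pvLoop_eq upper (i+2) (res ++ [v])]
        simp
    · -- last character
      have hnil : upper.drop (i + 1) = [] := by
        rw [List.drop_eq_nil_iff]; omega
      rw [hdropi, hnil, pvBRun_single]
      rcases hs : pvHeSingles.get? [upper[i]] with _ | v
      · simp only [if_neg h2, hs]
        rw [pvLoop_eq upper (i+1) res, hnil, pvBRun_nil]
        simp [pvSinglesFlat_none _ hs]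
      · simp only [if_neg h2, hs]
        rw [pvLoop_eq upper (i+1) (res ++ [v]), hnil, pvBRun_nil]
        simp [pvSinglesFlat_some _ _ hs]
  · rw [dif_neg h]
    rw [List.drop_eq_nil_of_le (by omega)]
    simp [pvBRun_nil]
termination_by upper.length - i

-- ===== VERDICT (by name: the statement is the Claim_ definition above) =====
theorem transliterate_word_hebrew_py_spec : Claim_equal_transliterate_word_hebrew_py := by
  intro word _
  unfold Spec_transliterate_word_hebrew_py transliterate_word_hebrew_py transliterate_word_hebrew_py_alt
  set upper := PySem.Chars.strip (PySem.Chars.upper word.toList) with hu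
  by_cases h : upper = []
  · simp [h]
  · simp only [h]
    have := pvLoop_eq upper 0 []
    simp only [List.drop_zero, List.flatten_nil, List.nil_append] at this
    rw [pvJoin_nil, pvJoin_nil, this, pvBRun]
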